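-- pv_equiv track=rewrite | github.com/ConnectDIY/python-best-practices | wildcard/wildcard.py | apply_wildcards_to_vals
-- ===== SOURCE A (Python) =====
-- import fnmatch
-- from typing import Union
--
-- def apply_wildcards_to_vals(vals: Union[str, list[str]],
--                             wildcards: Union[str, list[str]]) -> list[str]:
--     if isinstance(wildcards, str):
--         wildcards = [wildcards]
--
--     if isinstance(vals, str):
--         vals = [vals]
--
--     res = set()
--     for wd in wildcards:
--         matched_vals = fnmatch.filter(vals, wd)
--         res.update(set(matched_vals))
--     return list(res)
-- ===== SOURCE B (Python) =====
-- # B: no fnmatch/regex -- each wildcard is hand-compiled once into a list of atoms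
-- # (None = '*', otherwise a (negated, ranges) character test covering '?', '[...]'
-- # classes and literals uniformly), and each val is matched by an iterative
-- # dynamic-programming row over pattern positions (no backtracking, no recursion).
-- from typing import Union
--
--
-- def _ranges(body):
--     out = []
--     i, n = 0, len(body)
--     while i < n:
--         if i + 2 < n and body[i + 1] == '-':
--             out.append((body[i], body[i + 2]))
--             i += 3
--         else:
--             out.append((body[i], body[i]))
--             i += 1
--     return out
--
--
-- def _compile(pat):
--     atoms = []
--     i, n = 0, len(pat)
--     while i < n:
--         c = pat[i]
--         i += 1
--         if c == '*':
--             atoms.append(None)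
--         elif c == '?':
--             atoms.append((True, []))          # negated empty class: any char
--         elif c == '[':
--             j = i
--             if j < n and pat[j] == '!':
--                 j += 1
--             if j < n and pat[j] == ']':
--                 j += 1
--             k = pat.find(']', j)
--             if k < 0:
--                 atoms.append((False, [('[', '[')]))   # unclosed: literal '['
--             else:
--                 stuff = pat[i:k]
--                 i = k + 1
--                 if stuff.startswith('!'):
--                     atoms.append((True, _ranges(stuff[1:])))
--                 else:
--                     atoms.append((False, _ranges(stuff)))
--         else:
--             atoms.append((False, [(c, c)]))
--     return atoms
--
--
-- def _atom_match(a, c):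
--     neg, rs = a
--     return any(lo <= c <= hi for lo, hi in rs) != neg
--
--
-- def _init_row(atoms):
--     # row[j] = does atoms[j:] match the empty string; built right-to-left
--     m = len(atoms)
--     row = [False] * (m + 1)
--     row[m] = True
--     for j in range(m - 1, -1, -1):
--         row[j] = row[j + 1] if atoms[j] is None else False
--     return row
--
--
-- def _next_row(c, atoms, row):
--     # given the row for suffix s, the row for c + s, right-to-left
--     m = len(atoms)
--     new = [False] * (m + 1)
--     for j in range(m - 1, -1, -1):
--         a = atoms[j]
--         if a is None:
--             new[j] = new[j + 1] or row[j]
--         else: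
--             new[j] = _atom_match(a, c) and row[j + 1]
--     return new
--
--
-- def _match_dp(atoms, row0, s):
--     row = row0
--     for c in reversed(s):
--         row = _next_row(c, atoms, row)
--         if True not in row:
--             return False
--     return row[0]
--
--
-- def apply_wildcards_to_vals(vals: Union[str, list[str]],
--                             wildcards: Union[str, list[str]]) -> list[str]:
--     wds = [wildcards] if isinstance(wildcards, str) else wildcards
--     vs = [vals] if isinstance(vals, str) else vals
--
--     matched = set()
--     for wd in wds:
--         atoms = _compile(wd)
--         row0 = _init_row(atoms)
--         for v in vs:
--             if _match_dp(atoms, row0, v):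
--                 matched.add(v)
--     return list(matched)
-- ===== Notes on version B (the rewrite author's own statement) =====
-- stated objective: alternative
-- what changed: B drops fnmatch/regex entirely: each wildcard is hand-compiled once into a flat list of atoms (None for '*', otherwise a (negated, ranges) character test that covers '?', '[...]' classes and literals uniformly), and each val is decided by an iterative dynamic-programming row over pattern positions with an all-dead early exit, instead of A's per-wildcard fnmatch.filter which translates the pattern to a regex and matches with the backtracking re engine.
import Mathlib
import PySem

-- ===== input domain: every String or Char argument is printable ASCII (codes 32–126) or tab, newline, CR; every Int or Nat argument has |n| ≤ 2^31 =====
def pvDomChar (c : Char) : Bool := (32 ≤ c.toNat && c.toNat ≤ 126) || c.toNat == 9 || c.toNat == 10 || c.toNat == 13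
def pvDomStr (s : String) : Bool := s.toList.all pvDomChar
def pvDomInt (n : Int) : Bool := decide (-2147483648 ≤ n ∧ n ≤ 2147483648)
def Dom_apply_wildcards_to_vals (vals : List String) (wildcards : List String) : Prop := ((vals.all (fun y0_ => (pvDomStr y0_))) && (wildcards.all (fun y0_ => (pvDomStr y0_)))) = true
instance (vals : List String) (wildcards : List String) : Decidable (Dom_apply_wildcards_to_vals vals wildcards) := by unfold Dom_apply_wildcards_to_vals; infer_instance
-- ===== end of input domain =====

-- B drops fnmatch/regex: each wildcard is hand-compiled once into a flat atom list
-- (none = '*', otherwise a (negated, ranges) character test) and each val is decided by an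
-- iterative DP row over pattern positions (objective: alternative; not claimed faster).
-- The equivalence is about the RETURN value; the returned list holds the distinct matched
-- vals (Python's list(set) order is hash order, compared as a set by the harness).

-- ===== PORT A =====
-- A calls fnmatch.filter (translate to regex + re fullmatch). Model (exact on the ASCII
-- domain, fuzz-verified against CPython fnmatch): tokenize the pattern ('*', '?', '[...]'
-- classes via the range grammar, literals; translate's chunk-merge of reversed ranges is
-- membership-neutral, and '**' compression is match-neutral, so neither is modelled), then
-- match by the standard backtracking denotation of the token list (exact: translate's
-- atomic groups commit to the earliest occurrence, which is complete here).

inductive Tok where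
  | star : Tok
  | any : Tok
  | lit : Char → Tok
  | cls : Bool → List (Char × Char) → Tok
deriving DecidableEq, Repr

-- the class range grammar: x-y after a just-consumed literal is a range, else literal
def pvClsItems : List Char → List (Char × Char)
  | [] => []
  | a :: m :: b :: rest =>
    if m = '-' then (a, b) :: pvClsItems rest else (a, a) :: pvClsItems (m :: b :: rest)
  | a :: rest => (a, a) :: pvClsItems rest

def pvClassTok : List Char → Tok
  | '!' :: body => Tok.cls true (pvClsItems body)
  | stuff => Tok.cls false (pvClsItems stuff)

-- number of chars translate's class scan skips before searching for ']'
def pvPreLen : List Char → Nat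
  | '!' :: ']' :: _ => 2
  | '!' :: _ => 1
  | ']' :: _ => 1
  | _ => 0

-- scan to the closing ']' after the skip
def pvSplitAtRBracket : List Char → Option (List Char × List Char)
  | [] => none
  | c :: r =>
    if c = ']' then some ([], r)
    else (pvSplitAtRBracket r).map (fun p => (c :: p.1, p.2))

theorem pvSplitAtRBracket_length (l : List Char) (a b : List Char)
    (h : pvSplitAtRBracket l = some (a, b)) : b.length < l.length := by
  induction l generalizing a b with
  | nil => simp [pvSplitAtRBracket] at h
  | cons c r ih =>
    simp only [pvSplitAtRBracket] at h
    by_cases hc : c = ']'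
    · rw [if_pos hc] at h
      injection h with h2
      have hb : r = b := congrArg Prod.snd h2
      rw [← hb, List.length_cons]; omega
    · rw [if_neg hc] at h
      rcases Option.map_eq_some_iff.mp h with ⟨⟨p1, p2⟩, hp, hpe⟩
      have h1 := ih p1 p2 hp
      have hb : p2 = b := congrArg Prod.snd hpe
      rw [← hb, List.length_cons]; omega

def pvScanClass (rest : List Char) : Option (List Char × List Char) :=
  (pvSplitAtRBracket (rest.drop (pvPreLen rest))).map
    (fun p => (rest.take (pvPreLen rest) ++ p.1, p.2))

theorem pvScanClass_length (rest : List Char) (st rem : List Char)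
    (h : pvScanClass rest = some (st, rem)) : rem.length < rest.length := by
  unfold pvScanClass at h
  rcases Option.map_eq_some_iff.mp h with ⟨⟨p1, p2⟩, hp, hpe⟩
  have h1 := pvSplitAtRBracket_length _ p1 p2 hp
  have hb : p2 = rem := congrArg Prod.snd hpe
  have h2 : (rest.drop (pvPreLen rest)).length ≤ rest.length := by
    rw [List.length_drop]; omega
  rw [hb] at h1
  omega

-- the pattern scan of fnmatch.translate: '*', '?', '[...]' classes, literals
def pvTokenize : List Char → List Tok
  | [] => []
  | c :: r =>
    if c = '*' then Tok.star :: pvTokenize r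
    else if c = '?' then Tok.any :: pvTokenize r
    else if c = '[' then
      match h : pvScanClass r with
      | none => Tok.lit '[' :: pvTokenize r          -- unclosed '[': literal
      | some (stuff, rem) => pvClassTok stuff :: pvTokenize rem
    else Tok.lit c :: pvTokenize r
termination_by l => l.length
decreasing_by
  all_goals simp only [List.length_cons]
  all_goals first
    | omega
    | (have := pvScanClass_length _ _ _ h; omega)

def pvCharMatch : Tok → Char → Bool
  | Tok.star, _ => false
  | Tok.any, _ => true
  | Tok.lit a, c => c = a
  | Tok.cls neg items, c => (items.any fun p => p.1 ≤ c && c ≤ p.2) != neg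

-- the regex full-match of the translated pattern: backtracking denotation over tokens
def pvMatchToks : List Tok → List Char → Bool
  | [], s => s.isEmpty
  | t :: ts, s =>
    if t = Tok.star then
      pvMatchToks ts s || (match s with | [] => false | _ :: s' => pvMatchToks (t :: ts) s')
    else
      match s with
      | [] => false
      | c :: s' => pvCharMatch t c && pvMatchToks ts s'
termination_by toks s => (s.length, toks.length)

-- fnmatch.fnmatch(v, wd) (os.path.normcase is the identity on POSIX)
def pvFnMatch (wd : String) (v : String) : Bool := pvMatchToks (pvTokenize wd.toList) v.toList

-- A: res = set(); for wd in wildcards: res.update(set(fnmatch.filter(vals, wd))); list(res)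
-- (the isinstance str-normalization guards are no-ops at this List String signature)
def apply_wildcards_to_vals (vals : List String) (wildcards : List String) : List String :=
  wildcards.foldl
    (fun res wd => PySem.Set.update res (PySem.Set.ofList (vals.filter (fun v => pvFnMatch wd v))))
    PySem.Set.empty

-- ===== PORT B =====
-- Source B _ranges: the while loop with the three-char lookahead, by list shape
def gwRanges : List Char → List (Char × Char)
  | [] => []
  | [a] => [(a, a)]
  | [a, b] => [(a, a), (b, b)]
  | a :: b :: c :: rest =>
    if b = '-' then (a, c) :: gwRanges rest else (a, a) :: gwRanges (b :: c :: rest)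

-- Source B _compile: one pass over the pattern producing atoms; an atom is none ('*') or a
-- (negated, ranges) test: '?' = (True, []), literal c = (False, [(c,c)]), class as scanned;
-- the closing ']' is located with pat.find(']', j) = findIdx? past the skipped prefix
def gwCompile : List Char → List (Option (Bool × List (Char × Char)))
  | [] => []
  | c :: r =>
    if c = '*' then none :: gwCompile r
    else if c = '?' then some (true, []) :: gwCompile r
    else if c = '[' then
      match (r.drop (pvPreLen r)).findIdx? (fun d => d = ']') with
      | none => some (false, [('[', '[')]) :: gwCompile r
      | some m =>
        let stuff := r.take (pvPreLen r + m)
        (if stuff.head? = some '!' then some (true, gwRanges stuff.tail)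
         else some (false, gwRanges stuff)) :: gwCompile (r.drop (pvPreLen r + m + 1))
    else some (false, [(c, c)]) :: gwCompile r
termination_by l => l.length
decreasing_by
  all_goals simp only [List.length_cons, List.length_drop]
  all_goals omega

-- Source B _atom_match
def gwAtomMatch (a : Bool × List (Char × Char)) (c : Char) : Bool :=
  (a.2.any fun p => p.1 ≤ c && c ≤ p.2) != a.1

-- Source B _init_row: row[j] = does atoms[j:] match ''; built right-to-left
def gwInitRow : List (Option (Bool × List (Char × Char))) → List Bool
  | [] => [true]
  | a :: ts =>
    let rest := gwInitRow ts
    (if a.isNone then rest.headD false else false) :: rest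

-- Source B _next_row: from the row for suffix s, the row for c + s, right-to-left
def gwNextRow (c : Char) : List (Option (Bool × List (Char × Char))) → List Bool → List Bool
  | [], _ => [false]
  | a :: ts, row =>
    let ns := gwNextRow c ts row.tail
    (match a with
     | none => ns.headD false || row.headD false
     | some a => gwAtomMatch a c && row.tail.headD false) :: ns

-- Source B _match_dp: fold the row over reversed(s), bailing out once the row is all-False
def gwMatchGo (atoms : List (Option (Bool × List (Char × Char)))) : List Char → List Bool → Bool
  | [], row => row.headD false
  | c :: cs, row =>
    let row' := gwNextRow c atoms row
    if row'.any (fun b => b) then gwMatchGo atoms cs row' else false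

def gwMatch (atoms : List (Option (Bool × List (Char × Char)))) (row0 : List Bool)
    (s : List Char) : Bool :=
  gwMatchGo atoms s.reverse row0

-- B: per wildcard compile once and precompute the initial row, then scan vals adding matches
def apply_wildcards_to_vals_alt (vals : List String) (wildcards : List String) : List String :=
  wildcards.foldl
    (fun res wd =>
      let atoms := gwCompile wd.toList
      let row0 := gwInitRow atoms
      vals.foldl (fun r v => if gwMatch atoms row0 v.toList then PySem.Set.add r v else r) res)
    PySem.Set.empty

-- ===== PRECONDITION & SPEC =====
def Spec_apply_wildcards_to_vals (vals : List String) (wildcards : List String) (out : List String) : Prop := out = apply_wildcards_to_vals_alt vals wildcards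
instance (vals : List String) (wildcards : List String) (out : List String) : Decidable (Spec_apply_wildcards_to_vals vals wildcards out) := by unfold Spec_apply_wildcards_to_vals; infer_instance

-- ===== CLAIM (what is proved, stated in full; the proofs are below) =====
def Claim_equal_apply_wildcards_to_vals : Prop := ∀ (vals : List String) (wildcards : List String), Dom_apply_wildcards_to_vals vals wildcards → Spec_apply_wildcards_to_vals vals wildcards (apply_wildcards_to_vals vals wildcards)

-- ===== LEMMAS AND PROOFS =====

-- the token an atom denotes
def pvToAtom : Tok → Option (Bool × List (Char × Char))
  | Tok.star => none
  | Tok.any => some (true, [])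
  | Tok.lit c => some (false, [(c, c)])
  | Tok.cls n its => some (n, its)

theorem gwRanges_eq (l : List Char) : gwRanges l = pvClsItems l := by
  fun_induction gwRanges l with
  | case1 => simp [pvClsItems]
  | case2 a => simp [pvClsItems]
  | case3 a b => simp [pvClsItems]
  | case4 a c rest ih => simp [pvClsItems, ih]
  | case5 a b c rest hb ih => simp [pvClsItems, hb, ih]
  -- (gwRanges walks by explicit small shapes; pvClsItems by lookahead patterns)

theorem pvSplitAtRBracket_eq_findIdx (l : List Char) :
    pvSplitAtRBracket l
      = (l.findIdx? (fun d => d = ']')).map (fun m => (l.take m, l.drop (m + 1))) := by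
  induction l with
  | nil => simp [pvSplitAtRBracket]
  | cons c r ih =>
    by_cases hc : c = ']'
    · simp [pvSplitAtRBracket, hc, List.findIdx?_cons]
    · simp [pvSplitAtRBracket, hc, List.findIdx?_cons, ih, Option.map_map]
      rfl

theorem pvScanClass_eq_findIdx (r : List Char) :
    pvScanClass r
      = ((r.drop (pvPreLen r)).findIdx? (fun d => d = ']')).map
          (fun m => (r.take (pvPreLen r + m), r.drop (pvPreLen r + m + 1))) := by
  unfold pvScanClass
  rw [pvSplitAtRBracket_eq_findIdx, Option.map_map]
  congr 1
  funext m
  have h1 : r.take (pvPreLen r + m) = r.take (pvPreLen r) ++ (r.drop (pvPreLen r)).take m :=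
    List.take_add
  have h2 : (r.drop (pvPreLen r)).drop (m + 1) = r.drop (pvPreLen r + m + 1) := by
    rw [List.drop_drop]; congr 1
  simp [Function.comp, h1, h2]

theorem pvToAtom_classTok (stuff : List Char) :
    pvToAtom (pvClassTok stuff)
      = (if stuff.head? = some '!' then some (true, gwRanges stuff.tail)
         else some (false, gwRanges stuff)) := by
  cases stuff with
  | nil => simp [pvClassTok, pvToAtom, gwRanges, pvClsItems]
  | cons c body =>
    by_cases hc : c = '!'
    · subst hc; simp [pvClassTok, pvToAtom, gwRanges_eq]
    · have : pvClassTok (c :: body) = Tok.cls false (pvClsItems (c :: body)) := by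
        unfold pvClassTok
        split
        · rename_i heq; simp at heq; exact absurd heq.1 hc
        · rfl
      simp [this, pvToAtom, hc, gwRanges_eq]

theorem gwCompile_eq (p : List Char) : gwCompile p = (pvTokenize p).map pvToAtom := by
  fun_induction pvTokenize p with
  | case1 => simp [gwCompile]
  | case2 r ih => simp [gwCompile, pvToAtom, ih]
  | case3 r h1 ih => simp [gwCompile, pvToAtom, ih]
  | case4 r hscan h1 h2 ih =>
    rw [pvScanClass_eq_findIdx] at hscan
    have hf : (r.drop (pvPreLen r)).findIdx? (fun d => d = ']') = none := by
      by_contra hne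
      rcases Option.ne_none_iff_exists'.mp hne with ⟨m, hm⟩
      simp [hm] at hscan
    simp [gwCompile, hf, pvToAtom, ih]
  | case5 r stuff rem hscan h1 h2 ih =>
    rw [pvScanClass_eq_findIdx] at hscan
    rcases Option.map_eq_some_iff.mp hscan with ⟨m, hm, hme⟩
    have hstuff : stuff = r.take (pvPreLen r + m) := (congrArg Prod.fst hme).symm
    have hrem : rem = r.drop (pvPreLen r + m + 1) := (congrArg Prod.snd hme).symm
    simp only [gwCompile, hm]
    simp only [← hstuff, ← hrem, List.map_cons, ← pvToAtom_classTok, ih]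
    simp
  | case6 c r h1 h2 h3 ih => simp [gwCompile, h1, h2, h3, pvToAtom, ih]

theorem gwAtomMatch_eq (t : Tok) (c : Char) (a : Bool × List (Char × Char))
    (h : pvToAtom t = some a) : gwAtomMatch a c = pvCharMatch t c := by
  cases t with
  | star => simp [pvToAtom] at h
  | any => simp [pvToAtom] at h; simp [← h, gwAtomMatch, pvCharMatch]
  | cls n its => simp [pvToAtom] at h; simp [← h, gwAtomMatch, pvCharMatch]
  | lit x =>
    simp [pvToAtom] at h
    simp only [← h, gwAtomMatch, pvCharMatch, List.any_cons, List.any_nil, Bool.or_false,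
      Bool.bne_false]
    by_cases hc : c = x
    · subst hc; simp
    · simp [hc]
      intro h1
      exact lt_of_le_of_ne h1 (fun he => hc he.symm)

-- the backtracking denotation over atoms (reference semantics for the DP proofs)
def gwMatchAtoms : List (Option (Bool × List (Char × Char))) → List Char → Bool
  | [], s => s.isEmpty
  | none :: ts, s =>
    gwMatchAtoms ts s || (match s with | [] => false | _ :: s' => gwMatchAtoms (none :: ts) s')
  | some a :: ts, s =>
    match s with
    | [] => false
    | c :: s' => gwAtomMatch a c && gwMatchAtoms ts s'
termination_by toks s => (s.length, toks.length)

theorem gwMatchAtoms_map (s : List Char) : ∀ (ts : List Tok),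
    gwMatchAtoms (ts.map pvToAtom) s = pvMatchToks ts s := by
  induction s with
  | nil =>
    intro ts
    induction ts with
    | nil => simp [gwMatchAtoms, pvMatchToks]
    | cons t ts iht =>
      cases t with
      | star => simp [gwMatchAtoms, pvMatchToks, pvToAtom, iht]
      | any => simp [gwMatchAtoms, pvMatchToks, pvToAtom]
      | lit x => simp [gwMatchAtoms, pvMatchToks, pvToAtom]
      | cls n its => simp [gwMatchAtoms, pvMatchToks, pvToAtom]
  | cons c s' ihs =>
    intro ts
    induction ts with
    | nil => simp [gwMatchAtoms, pvMatchToks]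
    | cons t ts iht =>
      cases t with
      | star =>
        simp only [List.map_cons, pvToAtom, gwMatchAtoms, pvMatchToks, iht]
        have := ihs (Tok.star :: ts)
        simp only [List.map_cons, pvToAtom] at this
        simp [this]
      | any =>
        simp only [List.map_cons, pvToAtom, gwMatchAtoms, pvMatchToks]
        rw [gwAtomMatch_eq Tok.any c _ rfl, ihs ts]
        simp
      | lit x =>
        simp only [List.map_cons, pvToAtom, gwMatchAtoms, pvMatchToks]
        rw [gwAtomMatch_eq (Tok.lit x) c _ rfl, ihs ts]
        simp
      | cls n its =>
        simp only [List.map_cons, pvToAtom, gwMatchAtoms, pvMatchToks]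
        rw [gwAtomMatch_eq (Tok.cls n its) c _ rfl, ihs ts]
        simp

-- row of matches of all atom suffixes against s: the DP invariant
def gwRowSpec : List (Option (Bool × List (Char × Char))) → List Char → List Bool
  | [], s => [s.isEmpty]
  | t :: ts, s => gwMatchAtoms (t :: ts) s :: gwRowSpec ts s

theorem gwHeadD_rowSpec (ts : List (Option (Bool × List (Char × Char)))) (s : List Char) :
    (gwRowSpec ts s).head?.getD false = gwMatchAtoms ts s := by
  cases ts with
  | nil => simp [gwRowSpec, gwMatchAtoms]
  | cons t ts => cases t <;> simp [gwRowSpec]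

theorem gwInitRow_eq (toks : List (Option (Bool × List (Char × Char)))) :
    gwInitRow toks = gwRowSpec toks [] := by
  induction toks with
  | nil => simp [gwInitRow, gwRowSpec]
  | cons t ts ih =>
    cases t <;> simp [gwInitRow, gwRowSpec, ih, gwHeadD_rowSpec, gwMatchAtoms]

theorem gwNextRow_rowSpec (c : Char) (toks : List (Option (Bool × List (Char × Char))))
    (s : List Char) : gwNextRow c toks (gwRowSpec toks s) = gwRowSpec toks (c :: s) := by
  induction toks with
  | nil => simp [gwNextRow, gwRowSpec]
  | cons t ts ih =>
    cases t <;> simp [gwNextRow, gwRowSpec, ih, gwHeadD_rowSpec, gwMatchAtoms]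

-- an all-False row stays all-False under gwNextRow
theorem gwNextRow_allFalse (c : Char) (toks : List (Option (Bool × List (Char × Char))))
    (row : List Bool) (h : ∀ x ∈ row, x = false) :
    ∀ x ∈ gwNextRow c toks row, x = false := by
  induction toks generalizing row with
  | nil => simp [gwNextRow]
  | cons t ts ih =>
    have htail : ∀ x ∈ row.tail, x = false := by
      intro x hx; exact h x (List.mem_of_mem_tail hx)
    have hh : row.head?.getD false = false := by
      cases row with
      | nil => rfl
      | cons a r => exact h a List.mem_cons_self
    have h1 : row[1]?.getD false = false := by
      match row with
      | [] => rfl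
      | [a] => rfl
      | a :: b :: r => exact h b (by simp)
    have hns := ih row.tail htail
    have hnsh : (gwNextRow c ts row.tail).head?.getD false = false := by
      cases hn : gwNextRow c ts row.tail with
      | nil => rfl
      | cons a r => exact hns a (by rw [hn]; exact List.mem_cons_self)
    intro x hx
    simp only [gwNextRow] at hx
    rcases List.mem_cons.mp hx with hx | hx
    · subst hx
      cases t with
      | none => simp [hnsh, hh]
      | some a => simp [h1]
    · exact hns x hx

theorem gwRowSpec_allFalse_append (toks : List (Option (Bool × List (Char × Char))))
    (s : List Char) (h : ∀ x ∈ gwRowSpec toks s, x = false) (u : List Char) :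
    ∀ x ∈ gwRowSpec toks (u ++ s), x = false := by
  induction u with
  | nil => simpa using h
  | cons d u ih =>
    have heq : gwRowSpec toks (d :: (u ++ s)) = gwNextRow d toks (gwRowSpec toks (u ++ s)) :=
      (gwNextRow_rowSpec d toks (u ++ s)).symm
    intro x hx
    rw [List.cons_append, heq] at hx
    exact gwNextRow_allFalse d toks _ ih x hx

theorem gwHeadD_of_allFalse (l : List Bool) (h : ∀ x ∈ l, x = false) :
    l.head?.getD false = false := by
  cases l with
  | nil => rfl
  | cons a r => exact h a List.mem_cons_self

theorem gwMatchGo_spec (toks : List (Option (Bool × List (Char × Char))))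
    (cs s : List Char) :
    gwMatchGo toks cs (gwRowSpec toks s) = gwMatchAtoms toks (cs.reverse ++ s) := by
  induction cs generalizing s with
  | nil =>
    cases toks with
    | nil => simp [gwMatchGo, gwRowSpec, gwMatchAtoms]
    | cons t ts => cases t <;> simp [gwMatchGo, gwRowSpec]
  | cons c cs ih =>
    simp only [gwMatchGo, gwNextRow_rowSpec]
    by_cases hb : (gwRowSpec toks (c :: s)).any (fun b => b)
    · rw [if_pos hb, ih (c :: s)]
      simp [List.append_assoc]
    · rw [if_neg hb]
      have hall : ∀ x ∈ gwRowSpec toks (c :: s), x = false := by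
        intro x hx
        cases x with
        | false => rfl
        | true => exact absurd (List.any_eq_true.mpr ⟨true, hx, rfl⟩) hb
      have hdead := gwRowSpec_allFalse_append toks (c :: s) hall cs.reverse
      have hm : gwMatchAtoms toks (cs.reverse ++ (c :: s)) = false := by
        rw [← gwHeadD_rowSpec]
        exact gwHeadD_of_allFalse _ hdead
      rw [eq_comm]
      simpa [List.append_assoc] using hm

theorem gwMatch_eq_fnMatch (wd v : String) :
    gwMatch (gwCompile wd.toList) (gwInitRow (gwCompile wd.toList)) v.toList
      = pvFnMatch wd v := by
  unfold gwMatch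
  rw [gwInitRow_eq, gwMatchGo_spec]
  rw [gwCompile_eq, List.append_nil, List.reverse_reverse, gwMatchAtoms_map]
  rfl

-- B's guarded add-loop is A's update-with-filter
theorem pvFoldl_if_add (p : String → Bool) (vals : List String) (res : List String) :
    vals.foldl (fun r v => if p v then PySem.Set.add r v else r) res
      = PySem.Set.update res (vals.filter p) := by
  induction vals generalizing res with
  | nil => simp [PySem.Set.update_nil]
  | cons v vs ih =>
    by_cases hp : p v <;> simp [hp, ih, PySem.Set.update_cons]

-- update with set(xs) is update with xs
theorem pvUpdate_ofList (res : List String) (xs : List String) :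
    PySem.Set.update res (PySem.Set.ofList xs) = PySem.Set.update res xs := by
  rw [PySem.Set.update_eq_append_filter, PySem.Set.update_eq_append_filter,
    PySem.Set.ofList_ofList]

-- ===== VERDICT (by name: the statement is the Claim_ definition above) =====
theorem apply_wildcards_to_vals_spec : Claim_equal_apply_wildcards_to_vals := by
  intro vals wildcards _
  unfold Spec_apply_wildcards_to_vals apply_wildcards_to_vals apply_wildcards_to_vals_alt
  have hstep : (fun (res : List String) (wd : String) =>
        PySem.Set.update res (PySem.Set.ofList (vals.filter (fun v => pvFnMatch wd v))))
      = (fun (res : List String) (wd : String) =>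
        let atoms := gwCompile wd.toList
        let row0 := gwInitRow atoms
        vals.foldl (fun r v => if gwMatch atoms row0 v.toList then PySem.Set.add r v else r) res) := by
    funext res wd
    simp only
    have hfun : (fun (r : List String) (v : String) =>
          if gwMatch (gwCompile wd.toList) (gwInitRow (gwCompile wd.toList)) v.toList
          then PySem.Set.add r v else r)
        = (fun (r : List String) (v : String) => if pvFnMatch wd v then PySem.Set.add r v else r) := by
      funext r v
      rw [gwMatch_eq_fnMatch]
    rw [hfun, pvFoldl_if_add, pvUpdate_ofList]
  exact congrArg
    (fun (f : List String → String → List String) => wildcards.foldl f PySem.Set.empty) hstep
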